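-- pv_equiv track=rewrite | github.com/hitokirisss/misis_sis_analyze | task2/task.py | compute_relationships
-- ===== SOURCE A (Python) =====
-- from collections import defaultdict, deque
--
-- def compute_relationships(edges, total_nodes):
--     adjacency_list = defaultdict(list)
--     reverse_adjacency_list = defaultdict(list)
--
--     for parent, child in edges:
--         adjacency_list[parent].append(child)
--         reverse_adjacency_list[child].append(parent)
--
--     relationships = [[0] * 5 for _ in range(total_nodes)]
--
--     for parent, children in adjacency_list.items():
--         for child in children:
--             relationships[parent - 1][0] += 1  # Out-degree
--             relationships[child - 1][1] += 1   # In-degree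
--
--     for node in range(1, total_nodes + 1):
--         visited = set()
--         queue = deque([(node, 0)])
--         while queue:
--             current, depth = queue.popleft()
--             if current in visited:
--                 continue
--             visited.add(current)
--             if depth > 1:
--                 relationships[node - 1][2] += 1  # Indirect children
--                 relationships[current - 1][3] += 1  # Indirect parents
--             for neighbor in adjacency_list[current]:
--                 if neighbor not in visited:
--                     queue.append((neighbor, depth + 1))
--
--     for node in range(1, total_nodes + 1):
--         parents = reverse_adjacency_list[node]
--         siblings = set()
--         for parent in parents:
--             siblings.update(adjacency_list[parent])
--         siblings.discard(node)
--         relationships[node - 1][4] = len(siblings)  # Sibling count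
--
--     return relationships
-- ===== SOURCE B (Python) =====
-- def compute_relationships(edges, total_nodes):
--     n = total_nodes
--
--     def children(x):
--         return [c for p, c in edges if p == x]
--
--     out_deg = [0] * n
--     in_deg = [0] * n
--     for p, c in edges:
--         out_deg[p - 1] += 1
--         in_deg[c - 1] += 1
--
--     ind_child = [0] * n
--     ind_parent = [0] * n
--     for u in range(1, n + 1):
--         reach = {u}
--         for _ in range(len(edges)):
--             grown = reach | {c for x in reach for c in children(x)}
--             if len(grown) == len(reach):
--                 break
--             reach = grown
--         indirect = reach - set(children(u)) - {u}
--         ind_child[u - 1] += len(indirect)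
--         for v in indirect:
--             ind_parent[v - 1] += 1
--
--     sib = [0] * n
--     for u in range(1, n + 1):
--         sibs = {c for p, q in edges if q == u for c in children(p)}
--         sib[u - 1] = len(sibs - {u})
--
--     return [list(cols) for cols in zip(out_deg, in_deg, ind_child, ind_parent, sib)]
-- ===== Notes on version B (the rewrite author's own statement) =====
-- stated objective: alternative
-- what changed: B keeps five flat per-column counter arrays and zips them into rows at the end instead of mutating a row-major table, recomputes child lists from the raw edge list by filtering instead of prebuilding adjacency dicts, and replaces A's depth-tagged BFS deque by iterated frontier closure (repeated union with the successor set until the set stops growing) followed by set subtraction of the direct successors and the node itself.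
import Mathlib
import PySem

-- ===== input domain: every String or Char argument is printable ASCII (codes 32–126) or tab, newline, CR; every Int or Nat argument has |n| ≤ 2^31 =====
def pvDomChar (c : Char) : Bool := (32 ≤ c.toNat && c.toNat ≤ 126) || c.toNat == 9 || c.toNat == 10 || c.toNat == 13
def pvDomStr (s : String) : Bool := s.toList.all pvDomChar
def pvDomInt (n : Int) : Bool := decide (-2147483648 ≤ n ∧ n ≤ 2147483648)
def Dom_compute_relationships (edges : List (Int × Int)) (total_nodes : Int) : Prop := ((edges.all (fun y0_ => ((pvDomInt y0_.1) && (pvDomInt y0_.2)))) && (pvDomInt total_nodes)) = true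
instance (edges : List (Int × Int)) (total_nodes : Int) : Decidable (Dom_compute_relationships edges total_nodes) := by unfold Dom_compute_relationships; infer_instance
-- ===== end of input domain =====

-- B (objective: alternative): B keeps five flat per-column counter arrays zipped into rows at the
-- end instead of mutating a row-major table, recomputes child lists from the raw edge list by
-- filtering instead of prebuilding adjacency dicts, and replaces A's depth-tagged BFS deque by
-- iterated frontier closure (union with the successor set until the set stops growing) followed by
-- set subtraction of the direct successors and the node itself.

-- ===== PORT A =====

-- Python list index normalization (negative index counts from the end; exact for in-range
-- indices, which Pre_ guarantees on every index either program touches).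
def pvRow (n : Nat) (i : Int) : Nat := (if i < 0 then i + (n : Int) else i).toNat

-- Python's `rel[i][j] += d` on A's row-major table.
def pvBump (rel : List (List Int)) (i : Int) (j : Nat) (d : Int) : List (List Int) :=
  rel.modify (pvRow rel.length i) (fun row => row.modify j (· + d))

-- Python's `rel[i][j] = v`.
def pvSetCol (rel : List (List Int)) (i : Int) (j : Nat) (v : Int) : List (List Int) :=
  rel.modify (pvRow rel.length i) (fun row => row.set j v)

-- A's adjacency_list / reverse_adjacency_list (defaultdict(list) append).
def pvAdjFwd (edges : List (Int × Int)) : PySem.Dict Int (List Int) :=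
  edges.foldl (fun d e => d.modify e.1 [] (· ++ [e.2])) (PySem.Dict.mk [])

def pvAdjRev (edges : List (Int × Int)) : PySem.Dict Int (List Int) :=
  edges.foldl (fun d e => d.modify e.2 [] (· ++ [e.1])) (PySem.Dict.mk [])

-- keys of the adjacency dict (termination measure for A's BFS worklist)
def pvCands (adj : PySem.Dict Int (List Int)) : List Int := PySem.Set.ofList adj.keys

lemma pvContains_add_false {s : PySem.Set Int} {v x : Int}
    (hx : List.contains (PySem.Set.add s v) x = false) : List.contains s x = false := by
  rw [Bool.eq_false_iff] at hx ⊢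
  intro hm
  apply hx
  rw [List.contains_iff_mem] at hm ⊢
  exact (PySem.Set.mem_add s v x).mpr (Or.inl hm)

lemma pvFilter_add_le (l : List Int) (s : PySem.Set Int) (v : Int) :
    (l.filter (fun x => !((PySem.Set.add s v).contains x))).length ≤
      (l.filter (fun x => !(s.contains x))).length := by
  simp only [← List.countP_eq_length_filter]
  apply List.countP_mono_left
  intro x _ hx
  simp only [Bool.not_eq_eq_eq_not, Bool.not_true, PySem.Set.contains_eq_listContains] at hx ⊢
  exact pvContains_add_false hx

lemma pvCands_filter_lt (adj : PySem.Dict Int (List Int)) (s : PySem.Set Int) (v : Int)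
    (hc : v ∈ pvCands adj) (hs : s.contains v = false) :
    ((pvCands adj).filter (fun x => !((PySem.Set.add s v).contains x))).length <
      ((pvCands adj).filter (fun x => !(s.contains x))).length := by
  obtain ⟨l1, l2, hsplit⟩ := List.append_of_mem hc
  rw [hsplit]
  simp only [List.filter_append, List.filter_cons, List.length_append]
  have le1 := pvFilter_add_le l1 s v
  have le2 := pvFilter_add_le l2 s v
  have hvnew : ((PySem.Set.add s v).contains v) = true := by
    simp [PySem.Set.contains_iff, PySem.Set.mem_add]
  have hvold : (s.contains v) = false := hs
  rw [hvnew, hvold]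
  split_ifs <;> simp_all <;> omega

lemma pvNotKey_getD_nil (adj : PySem.Dict Int (List Int)) (v : Int) (h : v ∉ pvCands adj) :
    adj.getD v [] = [] := by
  apply PySem.Dict.getD_of_not_contains
  rw [Bool.eq_false_iff]
  intro hc
  exact h (by simpa [pvCands, PySem.Set.mem_ofList] using
    (PySem.Dict.contains_iff_mem_keys adj v).mp hc)

-- the `while queue:` BFS of A, with rel threaded through (depth-tagged queue entries)
def pvBfsA (adj : PySem.Dict Int (List Int)) (node : Int) (visited : PySem.Set Int)
    (queue : List (Int × Int)) (rel : List (List Int)) : List (List Int) :=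
  match queue with
  | [] => rel
  | (current, depth) :: rest =>
    if h : visited.contains current then pvBfsA adj node visited rest rel
    else
      let visited' := PySem.Set.add visited current
      let rel' := if depth > 1 then pvBump (pvBump rel (node - 1) 2 1) (current - 1) 3 1 else rel
      pvBfsA adj node visited'
        (rest ++ ((adj.getD current []).filter (fun nb => !(visited'.contains nb))).map
          (fun nb => (nb, depth + 1))) rel'
termination_by ((((pvCands adj).filter (fun x => !(visited.contains x))).length, queue.length))
decreasing_by
  · exact Prod.Lex.right _ (by simp)
  · rcases Decidable.em (current ∈ pvCands adj) with hin | hout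
    · exact Prod.Lex.left _ _ (pvCands_filter_lt adj visited current hin (by simpa using h))
    · have hnil : adj.getD current [] = [] := pvNotKey_getD_nil adj current hout
      have heq : ((pvCands adj).filter (fun x => !((PySem.Set.add visited current).contains x))).length
          = ((pvCands adj).filter (fun x => !(visited.contains x))).length := by
        apply congrArg
        apply List.filter_congr
        intro x hx
        have hxc : x ≠ current := fun hxe => hout (hxe ▸ hx)
        simp [PySem.Set.contains_eq_listContains, List.contains_iff_mem,
          PySem.Set.mem_add, hxc]
      rw [heq, hnil]
      exact Prod.Lex.right _ (by simp)

def compute_relationships (edges : List (Int × Int)) (total_nodes : Int) : List (List Int) :=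
  let adjacency := pvAdjFwd edges
  let reverse := pvAdjRev edges
  let rel0 := List.replicate total_nodes.toNat (List.replicate 5 0)
  let rel1 := adjacency.items.foldl
    (fun r pc => pc.2.foldl (fun r c => pvBump (pvBump r (pc.1 - 1) 0 1) (c - 1) 1 1) r) rel0
  let rel2 := (PySem.List.pyRange 1 (total_nodes + 1) 1).foldl
    (fun r node => pvBfsA adjacency node [] [(node, 0)] r) rel1
  (PySem.List.pyRange 1 (total_nodes + 1) 1).foldl
    (fun r node =>
      let siblings := (reverse.getD node []).foldl
        (fun s p => PySem.Set.update s (adjacency.getD p [])) ([] : PySem.Set Int)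
      pvSetCol r (node - 1) 4 ((PySem.Set.discard siblings node).length : Int)) rel2

-- ===== PORT B =====

-- B's `children(x)`: child list recomputed from the raw edge list by filtering.
def pvChildren (edges : List (Int × Int)) (x : Int) : List Int :=
  (edges.filter (fun e => e.1 == x)).map (fun e => e.2)

-- Python's `col[i] += d` on a flat Int list.
def pvIncr (v : List Int) (i : Int) (d : Int) : List Int :=
  v.modify (pvRow v.length i) (· + d)

-- Python's `col[i] = x`.
def pvSet (v : List Int) (i : Int) (x : Int) : List Int :=
  v.set (pvRow v.length i) x

-- `reach | {c for x in reach for c in children(x)}`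
def pvGrow (edges : List (Int × Int)) (reach : PySem.Set Int) : PySem.Set Int :=
  PySem.Set.union reach (PySem.Set.ofList (reach.flatMap (fun x => pvChildren edges x)))

-- the `for _ in range(len(edges)): ... if len stops growing: break` frontier closure
def pvClosure (edges : List (Int × Int)) : Nat → PySem.Set Int → PySem.Set Int
  | 0, reach => reach
  | fuel + 1, reach =>
    let grown := pvGrow edges reach
    if grown.length = reach.length then reach else pvClosure edges fuel grown

-- `[list(cols) for cols in zip(a, b, c, d, e)]`
def pvZip5 : List Int → List Int → List Int → List Int → List Int → List (List Int)
  | a :: as, b :: bs, c :: cs, d :: ds, e :: es => [a, b, c, d, e] :: pvZip5 as bs cs ds es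
  | _, _, _, _, _ => []

def compute_relationships_alt (edges : List (Int × Int)) (total_nodes : Int) : List (List Int) :=
  let z : List Int := List.replicate total_nodes.toNat 0
  let deg := edges.foldl (fun st e => (pvIncr st.1 (e.1 - 1) 1, pvIncr st.2 (e.2 - 1) 1)) (z, z)
  let ind := (PySem.List.pyRange 1 (total_nodes + 1) 1).foldl
    (fun st u =>
      let reach := pvClosure edges edges.length [u]
      let indirect := PySem.Set.diff (PySem.Set.diff reach (PySem.Set.ofList (pvChildren edges u))) [u]
      (pvIncr st.1 (u - 1) (indirect.length : Int),
       indirect.foldl (fun v w => pvIncr v (w - 1) 1) st.2))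
    (z, z)
  let sib := (PySem.List.pyRange 1 (total_nodes + 1) 1).foldl
    (fun v u =>
      let sibs := PySem.Set.ofList
        ((edges.filter (fun e => e.2 == u)).flatMap (fun e => pvChildren edges e.1))
      pvSet v (u - 1) ((PySem.Set.diff sibs [u]).length : Int))
    z
  pvZip5 deg.1 deg.2 ind.1 ind.2 sib

-- ===== PRECONDITION & SPEC =====

-- Pre_: exactly the inputs on which Python A returns normally — every edge endpoint must be a
-- valid Python index into the node table (1-total_nodes ≤ e ≤ total_nodes, negative-wrap included);
-- outside this, A raises IndexError.
def Pre_compute_relationships (edges : List (Int × Int)) (total_nodes : Int) : Prop :=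
  ∀ e ∈ edges, (1 - total_nodes ≤ e.1 ∧ e.1 ≤ total_nodes) ∧
    (1 - total_nodes ≤ e.2 ∧ e.2 ≤ total_nodes)

instance (edges : List (Int × Int)) (total_nodes : Int) :
    Decidable (Pre_compute_relationships edges total_nodes) := by
  unfold Pre_compute_relationships; infer_instance

def pvWitness_compute_relationships : (List (Int × Int)) × Int := ([(1, 2), (2, 3), (3, 1)], 3)

def Spec_compute_relationships (edges : List (Int × Int)) (total_nodes : Int) (out : List (List Int)) : Prop := out = compute_relationships_alt edges total_nodes
instance (edges : List (Int × Int)) (total_nodes : Int) (out : List (List Int)) : Decidable (Spec_compute_relationships edges total_nodes out) := by unfold Spec_compute_relationships; infer_instance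

-- ===== CLAIM (what is proved, stated in full; the proofs are below) =====
def Claim_equal_compute_relationships : Prop := ∀ (edges : List (Int × Int)) (total_nodes : Int), Dom_compute_relationships edges total_nodes → Pre_compute_relationships edges total_nodes → Spec_compute_relationships edges total_nodes (compute_relationships edges total_nodes)

-- ===== LEMMAS AND PROOFS =====

-- ---- update-commutation facts about pvBump / pvIncr ----

lemma pvRowMod_comm (row : List Int) (j j' : Nat) (a b : Int) :
    (row.modify j (· + a)).modify j' (· + b) = (row.modify j' (· + b)).modify j (· + a) := by
  apply List.ext_getElem (by simp)
  intro t h1 h2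
  simp only [List.getElem_modify, List.length_modify]
  split_ifs <;> omega

lemma pvRowMod_add (row : List Int) (j : Nat) (a b : Int) :
    (row.modify j (· + a)).modify j (· + b) = row.modify j (· + (a + b)) := by
  apply List.ext_getElem (by simp)
  intro t h1 h2
  simp only [List.getElem_modify, List.length_modify]
  split_ifs <;> omega

lemma pvBump_comm (rel : List (List Int)) (i i' : Int) (j j' : Nat) (a b : Int) :
    pvBump (pvBump rel i j a) i' j' b = pvBump (pvBump rel i' j' b) i j a := by
  unfold pvBump
  simp only [List.length_modify]
  apply List.ext_getElem (by simp)
  intro t h1 h2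
  simp only [List.getElem_modify, List.length_modify]
  split_ifs <;> first | rfl | (exact pvRowMod_comm _ _ _ _ _) | (exact (pvRowMod_comm _ _ _ _ _).symm)

lemma pvBump_add (rel : List (List Int)) (i : Int) (j : Nat) (a b : Int) :
    pvBump (pvBump rel i j a) i j b = pvBump rel i j (a + b) := by
  unfold pvBump
  simp only [List.length_modify]
  apply List.ext_getElem (by simp)
  intro t h1 h2
  simp only [List.getElem_modify, List.length_modify]
  split_ifs <;> first | rfl | (exact pvRowMod_add _ _ _ _)

lemma pvBump_zero (rel : List (List Int)) (i : Int) (j : Nat) :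
    pvBump rel i j 0 = rel := by
  unfold pvBump
  apply List.ext_getElem (by simp)
  intro t h1 h2
  simp only [List.getElem_modify, List.length_modify]
  split_ifs with h
  · apply List.ext_getElem (by simp)
    intro u hu1 hu2
    simp only [List.getElem_modify]
    split_ifs <;> omega
  · rfl

lemma pvIncr_comm (v : List Int) (i i' : Int) (d d' : Int) :
    pvIncr (pvIncr v i d) i' d' = pvIncr (pvIncr v i' d') i d := by
  unfold pvIncr
  simp only [List.length_modify]
  apply List.ext_getElem (by simp)
  intro t h1 h2
  simp only [List.getElem_modify, List.length_modify]
  split_ifs <;> ring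

-- interleaved (bump col 2, bump col 3) fold = bulk bump col 2, then bump-col-3 fold
lemma pvApply_interchange (node : Int) (L : List Int) (rel : List (List Int)) :
    L.foldl (fun r v => pvBump (pvBump r (node - 1) 2 1) (v - 1) 3 1) rel
      = L.foldl (fun r v => pvBump r (v - 1) 3 1) (pvBump rel (node - 1) 2 (L.length : Int)) := by
  induction L generalizing rel with
  | nil => simp [pvBump_zero]
  | cons v T ih =>
    simp only [List.foldl_cons, List.length_cons]
    rw [ih]
    congr 1
    rw [pvBump_comm]
    rw [pvBump_add]
    congr 1
    push_cast
    ring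

-- ---- proof-side mirrors of A's BFS worklist ----

-- the ordered list of nodes A counts (popped unvisited with depth > 1)
def pvCnt (adj : PySem.Dict Int (List Int)) (node : Int) (visited : PySem.Set Int)
    (queue : List (Int × Int)) : List Int :=
  match queue with
  | [] => []
  | (current, depth) :: rest =>
    if h : visited.contains current then pvCnt adj node visited rest
    else
      let visited' := PySem.Set.add visited current
      let tail := pvCnt adj node visited'
        (rest ++ ((adj.getD current []).filter (fun nb => !(visited'.contains nb))).map
          (fun nb => (nb, depth + 1)))
      if depth > 1 then current :: tail else tail
termination_by ((((pvCands adj).filter (fun x => !(visited.contains x))).length, queue.length))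
decreasing_by
  · exact Prod.Lex.right _ (by simp)
  · rcases Decidable.em (current ∈ pvCands adj) with hin | hout
    · exact Prod.Lex.left _ _ (pvCands_filter_lt adj visited current hin (by simpa using h))
    · have hnil : adj.getD current [] = [] := pvNotKey_getD_nil adj current hout
      have heq : ((pvCands adj).filter (fun x => !((PySem.Set.add visited current).contains x))).length
          = ((pvCands adj).filter (fun x => !(visited.contains x))).length := by
        apply congrArg
        apply List.filter_congr
        intro x hx
        have hxc : x ≠ current := fun hxe => hout (hxe ▸ hx)
        simp [PySem.Set.contains_eq_listContains, List.contains_iff_mem,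
          PySem.Set.mem_add, hxc]
      rw [heq, hnil]
      exact Prod.Lex.right _ (by simp)

-- the ordered list of nodes newly visited by an untagged worklist traversal (proof device)
def pvVisit (adj : PySem.Dict Int (List Int)) (visited : PySem.Set Int) (queue : List Int) :
    List Int :=
  match queue with
  | [] => []
  | current :: rest =>
    if h : visited.contains current then pvVisit adj visited rest
    else
      let visited' := PySem.Set.add visited current
      current :: pvVisit adj visited'
        (rest ++ (adj.getD current []).filter (fun nb => !(visited'.contains nb)))
termination_by ((((pvCands adj).filter (fun x => !(visited.contains x))).length, queue.length))
decreasing_by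
  · exact Prod.Lex.right _ (by simp)
  · rcases Decidable.em (current ∈ pvCands adj) with hin | hout
    · exact Prod.Lex.left _ _ (pvCands_filter_lt adj visited current hin (by simpa using h))
    · have hnil : adj.getD current [] = [] := pvNotKey_getD_nil adj current hout
      have heq : ((pvCands adj).filter (fun x => !((PySem.Set.add visited current).contains x))).length
          = ((pvCands adj).filter (fun x => !(visited.contains x))).length := by
        apply congrArg
        apply List.filter_congr
        intro x hx
        have hxc : x ≠ current := fun hxe => hout (hxe ▸ hx)
        simp [PySem.Set.contains_eq_listContains, List.contains_iff_mem,
          PySem.Set.mem_add, hxc]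
      rw [heq, hnil]
      exact Prod.Lex.right _ (by simp)

-- fusion: A's BFS applies its counted list to rel as a fold
lemma pvBfsA_eq_foldl (adj : PySem.Dict Int (List Int)) (node : Int)
    (visited : PySem.Set Int) (queue : List (Int × Int)) (rel : List (List Int)) :
    pvBfsA adj node visited queue rel
      = (pvCnt adj node visited queue).foldl
          (fun r v => pvBump (pvBump r (node - 1) 2 1) (v - 1) 3 1) rel := by
  fun_induction pvBfsA adj node visited queue rel with
  | case1 => rw [pvCnt]; simp
  | case2 visited rel current depth rest h ih =>
    rw [pvCnt]
    rw [dif_pos h]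
    exact ih
  | case3 visited rel current depth rest h visitedp relp ih =>
    rw [pvCnt]
    rw [dif_neg h]
    simp only [visitedp, relp] at ih ⊢
    by_cases hd : depth > 1
    · rw [dif_pos hd] at ih ⊢
      simp only [if_pos hd, List.foldl_cons]
      exact ih
    · rw [dif_neg hd] at ih ⊢
      simp only [if_neg hd]
      exact ih

-- the membership test: "indirect" = reachable, not a direct successor, not the node
def pvIndirect (adj : PySem.Dict Int (List Int)) (node : Int) (v : Int) : Bool :=
  !((PySem.Set.ofList (adj.getD node [])).contains v) && !(v == node)

lemma pvPairwise_const {α : Type} (R : α → α → Prop) (l : List α) (h : ∀ a b, R a b) :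
    l.Pairwise R := by
  induction l with
  | nil => exact List.Pairwise.nil
  | cons x t ih => exact List.Pairwise.cons (fun b _ => h x b) ih

lemma pvVisit_cons_pos (adj : PySem.Dict Int (List Int)) (visited : PySem.Set Int)
    (current : Int) (rest : List Int) (h : visited.contains current = true) :
    pvVisit adj visited (current :: rest) = pvVisit adj visited rest := by
  rw [pvVisit.eq_def]; dsimp only; rw [dif_pos h]

lemma pvVisit_cons_neg (adj : PySem.Dict Int (List Int)) (visited : PySem.Set Int)
    (current : Int) (rest : List Int) (h : ¬ visited.contains current = true) :
    pvVisit adj visited (current :: rest)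
      = current :: pvVisit adj (PySem.Set.add visited current)
          (rest ++ (adj.getD current []).filter
            (fun nb => !((PySem.Set.add visited current).contains nb))) := by
  rw [pvVisit.eq_def]; dsimp only; rw [dif_neg h]

lemma pvCnt_cons_neg (adj : PySem.Dict Int (List Int)) (node : Int) (visited : PySem.Set Int)
    (current depth : Int) (rest : List (Int × Int)) (h : ¬ visited.contains current = true) :
    pvCnt adj node visited ((current, depth) :: rest)
      = (if depth > 1
          then current :: pvCnt adj node (PySem.Set.add visited current)
            (rest ++ ((adj.getD current []).filter
              (fun nb => !((PySem.Set.add visited current).contains nb))).map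
              (fun nb => (nb, depth + 1)))
          else pvCnt adj node (PySem.Set.add visited current)
            (rest ++ ((adj.getD current []).filter
              (fun nb => !((PySem.Set.add visited current).contains nb))).map
              (fun nb => (nb, depth + 1)))) := by
  rw [pvCnt.eq_def]; dsimp only; rw [dif_neg h]

-- CORE: on a queue satisfying the BFS depth invariants, A counts exactly the newly visited
-- nodes that pass the indirectness test, in traversal order.
lemma pvCnt_eq_filter (adj : PySem.Dict Int (List Int)) (node : Int)
    (visited : PySem.Set Int) (queue : List (Int × Int)) :
    node ∈ visited →
    queue.Pairwise (fun a b => a.2 ≤ b.2 ∧ b.2 ≤ a.2 + 1) →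
    (∀ pr ∈ queue, 0 ≤ pr.2) →
    (∀ pr ∈ queue, pr.2 = 0 → pr.1 = node) →
    (∀ pr ∈ queue, pr.2 = 1 → pr.1 ∈ adj.getD node []) →
    (∀ w ∈ adj.getD node [], w ∈ visited ∨ ((w, (1 : Int)) ∈ queue)) →
    pvCnt adj node visited queue
      = (pvVisit adj visited (queue.map Prod.fst)).filter (pvIndirect adj node) := by
  induction visited, queue using pvCnt.induct adj node with
  | case1 visited =>
    intro _ _ _ _ _ _
    rw [pvCnt]
    simp only [List.map_nil]
    rw [pvVisit]
    simp
  | case2 visited current depth rest h ih =>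
    intro hn hp h0 hd0 hd1 hcov
    rw [pvCnt, dif_pos h]
    simp only [List.map_cons]
    rw [pvVisit_cons_pos _ _ _ _ h]
    apply ih hn (List.Pairwise.of_cons hp)
      (fun pr hpr => h0 pr (List.mem_cons_of_mem _ hpr))
      (fun pr hpr => hd0 pr (List.mem_cons_of_mem _ hpr))
      (fun pr hpr => hd1 pr (List.mem_cons_of_mem _ hpr))
    intro w hw
    rcases hcov w hw with hv | hq
    · exact Or.inl hv
    · rcases List.mem_cons.mp hq with heq | hrest
      · have : w = current := congrArg Prod.fst heq
        exact Or.inl (this ▸ (PySem.Set.contains_iff _ _).mp h)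
      · exact Or.inr hrest
  | case3 visited current depth rest h visitedp hgt ih =>
    intro hn hp h0 hd0 hd1 hcov
    have hcur : current ∉ visited := by
      intro hc; exact h ((PySem.Set.contains_iff _ _).mpr hc)
    have hcur_node : current ≠ node := fun he => hcur (he ▸ hn)
    have hdnn : (0 : Int) ≤ depth := h0 (current, depth) List.mem_cons_self
    have hdne0 : depth ≠ 0 := by
      intro he
      exact hcur_node (hd0 (current, depth) List.mem_cons_self he)
    have hcross : ∀ b ∈ rest, depth ≤ b.2 ∧ b.2 ≤ depth + 1 :=
      fun b hb => (List.pairwise_cons.mp hp).1 b hb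
    simp only [visitedp] at ih
    have ihx : pvCnt adj node (PySem.Set.add visited current)
          (rest ++ ((adj.getD current []).filter
            (fun nb => !((PySem.Set.add visited current).contains nb))).map
            (fun nb => (nb, depth + 1)))
        = (pvVisit adj (PySem.Set.add visited current)
            (rest.map Prod.fst ++ (adj.getD current []).filter
              (fun nb => !((PySem.Set.add visited current).contains nb)))).filter
            (pvIndirect adj node) := by
      have hmapfst : (rest ++ ((adj.getD current []).filter
            (fun nb => !((PySem.Set.add visited current).contains nb))).map
            (fun nb => (nb, depth + 1))).map Prod.fst
          = rest.map Prod.fst ++ (adj.getD current []).filter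
            (fun nb => !((PySem.Set.add visited current).contains nb)) := by
        simp [List.map_map, Function.comp_def]
      rw [← hmapfst]
      apply ih ((PySem.Set.mem_add _ _ _).mpr (Or.inl hn))
      · rw [List.pairwise_append]
        refine ⟨List.Pairwise.of_cons hp, ?_, ?_⟩
        · rw [List.pairwise_map]
          exact pvPairwise_const _ _ (fun a b => ⟨le_refl _, by omega⟩)
        · intro a ha b hb
          rcases List.mem_map.mp hb with ⟨nb, _, hnb⟩
          have := hcross a ha
          constructor <;> (rw [← hnb]) <;> simp <;> omega
      · intro pr hpr
        rcases List.mem_append.mp hpr with h1 | h1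
        · exact h0 pr (List.mem_cons_of_mem _ h1)
        · rcases List.mem_map.mp h1 with ⟨nb, _, hnb⟩
          rw [← hnb]; simp; omega
      · intro pr hpr he
        rcases List.mem_append.mp hpr with h1 | h1
        · exact hd0 pr (List.mem_cons_of_mem _ h1) he
        · rcases List.mem_map.mp h1 with ⟨nb, _, hnb⟩
          rw [← hnb] at he; simp at he; omega
      · intro pr hpr he
        rcases List.mem_append.mp hpr with h1 | h1
        · exact hd1 pr (List.mem_cons_of_mem _ h1) he
        · rcases List.mem_map.mp h1 with ⟨nb, _, hnb⟩
          rw [← hnb] at he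
          simp only at he
          have hdz : depth = 0 := by omega
          exact absurd (hd0 (current, depth) List.mem_cons_self hdz) hcur_node
      · intro w hw
        rcases hcov w hw with hv | hq
        · exact Or.inl ((PySem.Set.mem_add _ _ _).mpr (Or.inl hv))
        · rcases List.mem_cons.mp hq with heq | hrest
          · have : w = current := congrArg Prod.fst heq
            exact Or.inl ((PySem.Set.mem_add _ _ _).mpr (Or.inr this))
          · exact Or.inr (List.mem_append_left _ hrest)
    rw [pvCnt_cons_neg _ _ _ _ _ _ h]
    simp only [List.map_cons]
    rw [pvVisit_cons_neg _ _ _ _ h]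
    have hnotadj : current ∉ adj.getD node [] := by
      intro hmem
      rcases hcov current hmem with hv | hq
      · exact hcur hv
      · rcases List.mem_cons.mp hq with heq | hrest
        · have : (1 : Int) = depth := congrArg Prod.snd heq
          omega
        · have := hcross (current, 1) hrest
          simp at this
          omega
    have hpB : pvIndirect adj node current = true := by
      simp [pvIndirect, PySem.Set.contains_eq_listContains, List.contains_iff_mem,
        PySem.Set.mem_ofList, hnotadj, hcur_node]
    rw [if_pos hgt, List.filter_cons, hpB]
    rw [ihx]
    simp
  | case4 visited current depth rest h visitedp hgt ih =>
    intro hn hp h0 hd0 hd1 hcov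
    have hcur : current ∉ visited := by
      intro hc; exact h ((PySem.Set.contains_iff _ _).mpr hc)
    have hcur_node : current ≠ node := fun he => hcur (he ▸ hn)
    have hdnn : (0 : Int) ≤ depth := h0 (current, depth) List.mem_cons_self
    have hdne0 : depth ≠ 0 := by
      intro he
      exact hcur_node (hd0 (current, depth) List.mem_cons_self he)
    have hcross : ∀ b ∈ rest, depth ≤ b.2 ∧ b.2 ≤ depth + 1 :=
      fun b hb => (List.pairwise_cons.mp hp).1 b hb
    simp only [visitedp] at ih
    have ihx : pvCnt adj node (PySem.Set.add visited current)
          (rest ++ ((adj.getD current []).filter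
            (fun nb => !((PySem.Set.add visited current).contains nb))).map
            (fun nb => (nb, depth + 1)))
        = (pvVisit adj (PySem.Set.add visited current)
            (rest.map Prod.fst ++ (adj.getD current []).filter
              (fun nb => !((PySem.Set.add visited current).contains nb)))).filter
            (pvIndirect adj node) := by
      have hmapfst : (rest ++ ((adj.getD current []).filter
            (fun nb => !((PySem.Set.add visited current).contains nb))).map
            (fun nb => (nb, depth + 1))).map Prod.fst
          = rest.map Prod.fst ++ (adj.getD current []).filter
            (fun nb => !((PySem.Set.add visited current).contains nb)) := by
        simp [List.map_map, Function.comp_def]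
      rw [← hmapfst]
      apply ih ((PySem.Set.mem_add _ _ _).mpr (Or.inl hn))
      · rw [List.pairwise_append]
        refine ⟨List.Pairwise.of_cons hp, ?_, ?_⟩
        · rw [List.pairwise_map]
          exact pvPairwise_const _ _ (fun a b => ⟨le_refl _, by omega⟩)
        · intro a ha b hb
          rcases List.mem_map.mp hb with ⟨nb, _, hnb⟩
          have := hcross a ha
          constructor <;> (rw [← hnb]) <;> simp <;> omega
      · intro pr hpr
        rcases List.mem_append.mp hpr with h1 | h1
        · exact h0 pr (List.mem_cons_of_mem _ h1)
        · rcases List.mem_map.mp h1 with ⟨nb, _, hnb⟩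
          rw [← hnb]; simp; omega
      · intro pr hpr he
        rcases List.mem_append.mp hpr with h1 | h1
        · exact hd0 pr (List.mem_cons_of_mem _ h1) he
        · rcases List.mem_map.mp h1 with ⟨nb, _, hnb⟩
          rw [← hnb] at he; simp at he; omega
      · intro pr hpr he
        rcases List.mem_append.mp hpr with h1 | h1
        · exact hd1 pr (List.mem_cons_of_mem _ h1) he
        · rcases List.mem_map.mp h1 with ⟨nb, _, hnb⟩
          rw [← hnb] at he
          simp only at he
          have hdz : depth = 0 := by omega
          exact absurd (hd0 (current, depth) List.mem_cons_self hdz) hcur_node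
      · intro w hw
        rcases hcov w hw with hv | hq
        · exact Or.inl ((PySem.Set.mem_add _ _ _).mpr (Or.inl hv))
        · rcases List.mem_cons.mp hq with heq | hrest
          · have : w = current := congrArg Prod.fst heq
            exact Or.inl ((PySem.Set.mem_add _ _ _).mpr (Or.inr this))
          · exact Or.inr (List.mem_append_left _ hrest)
    rw [pvCnt_cons_neg _ _ _ _ _ _ h]
    simp only [List.map_cons]
    rw [pvVisit_cons_neg _ _ _ _ h]
    have hd1' : depth = 1 := by omega
    have hadjcur : current ∈ adj.getD node [] :=
      hd1 (current, depth) List.mem_cons_self hd1'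
    have hpB : pvIndirect adj node current = false := by
      simp [pvIndirect, PySem.Set.contains_eq_listContains, List.contains_iff_mem,
        PySem.Set.mem_ofList, hadjcur]
    rw [if_neg hgt, List.filter_cons, hpB]
    rw [ihx]
    simp

-- ---- the degree pass: grouped iteration over the dict = one sweep over the edges ----

def pvPairs (d : PySem.Dict Int (List Int)) : List (Int × Int) :=
  d.items.flatMap (fun pc => pc.2.map (fun c => (pc.1, c)))

lemma pvDeg_A_eq (adj : PySem.Dict Int (List Int)) (rel0 : List (List Int)) :
    adj.items.foldl
        (fun r pc => pc.2.foldl (fun r c => pvBump (pvBump r (pc.1 - 1) 0 1) (c - 1) 1 1) r) rel0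
      = (pvPairs adj).foldl (fun r e => pvBump (pvBump r (e.1 - 1) 0 1) (e.2 - 1) 1 1) rel0 := by
  rw [pvPairs, List.foldl_flatMap]
  simp [List.foldl_map]

lemma pvDeg_rcomm (b : List (List Int)) (e1 e2 : Int × Int) :
    pvBump (pvBump (pvBump (pvBump b (e1.1 - 1) 0 1) (e1.2 - 1) 1 1) (e2.1 - 1) 0 1) (e2.2 - 1) 1 1
      = pvBump (pvBump (pvBump (pvBump b (e2.1 - 1) 0 1) (e2.2 - 1) 1 1) (e1.1 - 1) 0 1)
          (e1.2 - 1) 1 1 := by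
  calc pvBump (pvBump (pvBump (pvBump b (e1.1 - 1) 0 1) (e1.2 - 1) 1 1) (e2.1 - 1) 0 1) (e2.2 - 1) 1 1
      = pvBump (pvBump (pvBump (pvBump b (e1.1 - 1) 0 1) (e2.1 - 1) 0 1) (e1.2 - 1) 1 1) (e2.2 - 1) 1 1 := by
        rw [pvBump_comm (pvBump b (e1.1 - 1) 0 1)]
    _ = pvBump (pvBump (pvBump (pvBump b (e2.1 - 1) 0 1) (e1.1 - 1) 0 1) (e1.2 - 1) 1 1) (e2.2 - 1) 1 1 := by
        rw [pvBump_comm b]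
    _ = pvBump (pvBump (pvBump (pvBump b (e2.1 - 1) 0 1) (e1.1 - 1) 0 1) (e2.2 - 1) 1 1) (e1.2 - 1) 1 1 := by
        rw [pvBump_comm (pvBump (pvBump b (e2.1 - 1) 0 1) (e1.1 - 1) 0 1)]
    _ = pvBump (pvBump (pvBump (pvBump b (e2.1 - 1) 0 1) (e2.2 - 1) 1 1) (e1.1 - 1) 0 1) (e1.2 - 1) 1 1 := by
        rw [pvBump_comm (pvBump b (e2.1 - 1) 0 1)]

lemma pvPairs_insert (d : PySem.Dict Int (List Int)) (p c : Int) (hnd : d.keys.Nodup) :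
    (pvPairs (d.modify p [] (· ++ [c]))).Perm (pvPairs d ++ [(p, c)]) := by
  rw [PySem.Dict.modify]
  by_cases hc : d.contains p = true
  · have hpk : p ∈ d.keys := (PySem.Dict.contains_iff_mem_keys d p).mp hc
    obtain ⟨pair, hpair, hfst⟩ := List.exists_of_mem_map hpk
    obtain ⟨pre, suf, hsplit⟩ := List.append_of_mem hpair
    have hkeys : d.keys = pre.map Prod.fst ++ pair.1 :: suf.map Prod.fst := by
      rw [PySem.Dict.keys, hsplit]; simp
    have hnotpre : ∀ q ∈ pre, q.1 ≠ p := by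
      intro q hq he
      rw [hkeys] at hnd
      have hne := (List.nodup_append.mp hnd).2.2 p (List.mem_map.mpr ⟨q, hq, he⟩)
        pair.1 List.mem_cons_self
      exact hne hfst.symm
    have hnotsuf : ∀ q ∈ suf, q.1 ≠ p := by
      intro q hq he
      rw [hkeys] at hnd
      have h2 := (List.nodup_append.mp hnd).2.1
      rw [List.nodup_cons] at h2
      exact h2.1 (List.mem_map.mpr ⟨q, hq, he.trans hfst.symm⟩)
    have hpairval : pair = (p, pair.2) := by
      cases pair
      simp only at hfst
      simp [hfst]
    have hgetD : d.getD p [] = pair.2 := by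
      have hm : (p, pair.2) ∈ d.items := by
        rw [hsplit, ← hpairval]
        exact List.mem_append_right _ List.mem_cons_self
      exact PySem.Dict.getD_of_mem_items d hm hnd []
    rw [pvPairs, PySem.Dict.items_insert_of_contains d (d.getD p [] ++ [c]) hc]
    rw [hsplit]
    simp only [List.map_append, List.map_cons]
    have hpre : pre.map (fun q => if (q.1 == p) = true then (p, d.getD p [] ++ [c]) else q)
        = pre := by
      conv_rhs => rw [← List.map_id pre]
      exact List.map_congr_left (fun q hq => by simp [beq_iff_eq, hnotpre q hq])
    have hsuf : suf.map (fun q => if (q.1 == p) = true then (p, d.getD p [] ++ [c]) else q)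
        = suf := by
      conv_rhs => rw [← List.map_id suf]
      exact List.map_congr_left (fun q hq => by simp [beq_iff_eq, hnotsuf q hq])
    have hmid : (if (pair.1 == p) = true then (p, d.getD p [] ++ [c]) else pair)
        = (p, pair.2 ++ [c]) := by simp [hfst, hgetD]
    rw [hpre, hsuf, hmid]
    simp only [List.flatMap_append, List.flatMap_cons, List.map_append, List.map_cons,
      List.map_nil]
    have hβ : pvPairs d = (pre.flatMap fun pc => pc.2.map fun c => (pc.1, c)) ++
        ((pair.2.map fun c' => (p, c')) ++ (suf.flatMap fun pc => pc.2.map fun c => (pc.1, c))) := by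
      rw [pvPairs, hsplit]
      simp only [List.flatMap_append, List.flatMap_cons]
      rw [show pair.1 = p from hfst]
    rw [hβ]
    have hstep : ((pair.2.map fun c' => (p, c')) ++ [(p, c)]) ++
          (suf.flatMap fun pc => pc.2.map fun c => (pc.1, c))
        = (pair.2.map fun c' => (p, c')) ++ ([(p, c)] ++
          (suf.flatMap fun pc => pc.2.map fun c => (pc.1, c))) := by
      simp [List.append_assoc]
    rw [hstep]
    refine (List.Perm.append_left _ (List.Perm.append_left _ List.perm_append_comm)).trans ?_
    have hfin : (pre.flatMap fun pc => pc.2.map fun c => (pc.1, c)) ++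
          ((pair.2.map fun c' => (p, c')) ++
            ((suf.flatMap fun pc => pc.2.map fun c => (pc.1, c)) ++ [(p, c)]))
        = ((pre.flatMap fun pc => pc.2.map fun c => (pc.1, c)) ++
            ((pair.2.map fun c' => (p, c')) ++
              (suf.flatMap fun pc => pc.2.map fun c => (pc.1, c)))) ++ [(p, c)] := by
      simp [List.append_assoc]
    rw [hfin]
  · rw [pvPairs, PySem.Dict.items_insert_of_not_contains d (d.getD p [] ++ [c]) (by simpa using hc)]
    have hgetD : d.getD p [] = [] := PySem.Dict.getD_of_not_contains d [] (by simpa using hc)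
    rw [hgetD]
    simp [pvPairs, List.flatMap_append]

lemma pvPairs_build (edges : List (Int × Int)) :
    ∀ (d : PySem.Dict Int (List Int)), d.keys.Nodup →
      (pvPairs (edges.foldl (fun d e => d.modify e.1 [] (· ++ [e.2])) d)).Perm
        (pvPairs d ++ edges) := by
  induction edges with
  | nil => intro d _; simp
  | cons e es ih =>
    intro d hnd
    simp only [List.foldl_cons]
    have hnd' : (d.modify e.1 [] (· ++ [e.2])).keys.Nodup := by
      rw [PySem.Dict.modify]
      exact PySem.Dict.nodup_keys_insert _ _ _ hnd
    refine (ih _ hnd').trans ?_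
    refine ((pvPairs_insert d e.1 e.2 hnd).append_right es).trans ?_
    simp

-- ---- bridges: dict lookups = filters of the raw edge list ----

lemma pvAdjFwd_getD (edges : List (Int × Int)) (x : Int) :
    (pvAdjFwd edges).getD x [] = pvChildren edges x := by
  unfold pvAdjFwd pvChildren
  rw [PySem.Dict.getD_foldl_modify_append]
  rw [PySem.Dict.getD_of_not_contains _ _ (by simp)]
  rfl

lemma pvAdjRev_getD (edges : List (Int × Int)) (u : Int) :
    (pvAdjRev edges).getD u [] = (edges.filter (fun e => e.2 == u)).map (fun e => e.1) := by
  unfold pvAdjRev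
  have hswap : edges.foldl (fun d e => d.modify e.2 [] (· ++ [e.1])) (PySem.Dict.mk [])
      = (edges.map (fun e => (e.2, e.1))).foldl (fun d p => d.modify p.1 [] (· ++ [p.2]))
          (PySem.Dict.mk []) := by
    rw [List.foldl_map]
  rw [hswap, PySem.Dict.getD_foldl_modify_append]
  rw [PySem.Dict.getD_of_not_contains _ _ (by simp)]
  simp [List.filter_map, List.map_map, Function.comp_def]

lemma pvChildren_mem (edges : List (Int × Int)) (x c : Int) :
    c ∈ pvChildren edges x ↔ (x, c) ∈ edges := by
  simp only [pvChildren, List.mem_map, List.mem_filter]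
  constructor
  · rintro ⟨⟨a, b⟩, ⟨he, hax⟩, hbc⟩
    simp only [beq_iff_eq] at hax
    simp only at hbc
    rw [← hax, ← hbc]
    exact he
  · intro h
    exact ⟨(x, c), ⟨h, by simp⟩, rfl⟩

-- ---- reachability: both traversals compute the reachable set ----

def pvReaches (edges : List (Int × Int)) : Int → Int → Prop :=
  Relation.ReflTransGen (fun a b => (a, b) ∈ edges)

lemma pvStep_eq (edges : List (Int × Int)) :
    (fun a b => b ∈ (pvAdjFwd edges).getD a []) = (fun a b => (a, b) ∈ edges) := by
  funext a b
  simp [pvAdjFwd_getD, pvChildren_mem]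

lemma pvVisit_nodup (adj : PySem.Dict Int (List Int)) (visited : PySem.Set Int)
    (queue : List Int) (h : (visited : List Int).Nodup) :
    ((visited : List Int) ++ pvVisit adj visited queue).Nodup := by
  revert h
  induction visited, queue using pvVisit.induct adj with
  | case1 visited =>
    intro h
    rw [pvVisit]
    simpa using h
  | case2 visited current rest hc ih =>
    intro h
    rw [pvVisit_cons_pos _ _ _ _ hc]
    exact ih h
  | case3 visited current rest hc visitedp ih =>
    intro h
    have hcur : current ∉ visited := fun hm => hc ((PySem.Set.contains_iff _ _).mpr hm)
    have hadd : PySem.Set.add visited current = visited ++ [current] :=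
      PySem.Set.add_of_not_mem hcur
    rw [pvVisit_cons_neg _ _ _ _ hc]
    have h' : ((PySem.Set.add visited current : PySem.Set Int) : List Int).Nodup := by
      rw [hadd]
      refine List.Nodup.append h (List.nodup_singleton current) ?_
      intro a ha hb
      have hac : a = current := by simpa using hb
      exact hcur (hac ▸ ha)
    have hres := ih h'
    simp only [visitedp] at hres
    rw [hadd] at hres ⊢
    simpa [List.append_assoc] using hres

lemma pvVisit_sound (adj : PySem.Dict Int (List Int)) (visited : PySem.Set Int)
    (queue : List Int) :
    ∀ x ∈ pvVisit adj visited queue, ∃ q ∈ queue,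
      Relation.ReflTransGen (fun a b => b ∈ adj.getD a []) q x := by
  induction visited, queue using pvVisit.induct adj with
  | case1 visited =>
    rw [pvVisit]
    intro x hx
    simp at hx
  | case2 visited current rest hc ih =>
    rw [pvVisit_cons_pos _ _ _ _ hc]
    intro x hx
    obtain ⟨q, hq, hr⟩ := ih x hx
    exact ⟨q, List.mem_cons_of_mem _ hq, hr⟩
  | case3 visited current rest hc visitedp ih =>
    rw [pvVisit_cons_neg _ _ _ _ hc]
    intro x hx
    rcases List.mem_cons.mp hx with rfl | hx'
    · exact ⟨x, List.mem_cons_self, Relation.ReflTransGen.refl⟩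
    · obtain ⟨q, hq, hr⟩ := ih x (by simpa [visitedp] using hx')
      rcases List.mem_append.mp hq with hq1 | hq2
      · exact ⟨q, List.mem_cons_of_mem _ hq1, hr⟩
      · have hqc : q ∈ adj.getD current [] := List.mem_of_mem_filter hq2
        exact ⟨current, List.mem_cons_self, Relation.ReflTransGen.head hqc hr⟩

lemma pvVisit_mem_queue (adj : PySem.Dict Int (List Int)) (visited : PySem.Set Int)
    (queue : List Int) :
    ∀ q ∈ queue, q ∈ (visited : List Int) ++ pvVisit adj visited queue := by
  induction visited, queue using pvVisit.induct adj with
  | case1 visited =>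
    intro q hq
    simp at hq
  | case2 visited current rest hc ih =>
    rw [pvVisit_cons_pos _ _ _ _ hc]
    intro q hq
    rcases List.mem_cons.mp hq with rfl | hq'
    · exact List.mem_append_left _ ((PySem.Set.contains_iff _ _).mp hc)
    · exact ih q hq'
  | case3 visited current rest hc visitedp ih =>
    have hcur : current ∉ visited := fun hm => hc ((PySem.Set.contains_iff _ _).mpr hm)
    have hadd : PySem.Set.add visited current = visited ++ [current] :=
      PySem.Set.add_of_not_mem hcur
    rw [pvVisit_cons_neg _ _ _ _ hc]
    intro q hq
    rcases List.mem_cons.mp hq with rfl | hq'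
    · exact List.mem_append_right _ List.mem_cons_self
    · have hres := ih q (List.mem_append_left _ hq')
      simp only [visitedp] at hres
      rcases List.mem_append.mp hres with h1 | h1
      · rcases (PySem.Set.mem_add _ _ _).mp h1 with h2 | h2
        · exact List.mem_append_left _ h2
        · exact List.mem_append_right _ (h2 ▸ List.mem_cons_self)
      · exact List.mem_append_right _ (List.mem_cons_of_mem _ h1)

lemma pvVisit_closed (adj : PySem.Dict Int (List Int)) (visited : PySem.Set Int)
    (queue : List Int)
    (hinv : ∀ v ∈ (visited : List Int), ∀ c ∈ adj.getD v [],
      c ∈ (visited : List Int) ∨ c ∈ queue) :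
    ∀ v ∈ (visited : List Int) ++ pvVisit adj visited queue, ∀ c ∈ adj.getD v [],
      c ∈ (visited : List Int) ++ pvVisit adj visited queue := by
  revert hinv
  induction visited, queue using pvVisit.induct adj with
  | case1 visited =>
    intro hinv
    rw [pvVisit]
    simp only [List.append_nil]
    intro v hv c hcadj
    rcases hinv v hv c hcadj with h1 | h1
    · exact h1
    · simp at h1
  | case2 visited current rest hc ih =>
    intro hinv
    rw [pvVisit_cons_pos _ _ _ _ hc]
    apply ih
    intro v hv c hcadj
    rcases hinv v hv c hcadj with h1 | h1
    · exact Or.inl h1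
    · rcases List.mem_cons.mp h1 with rfl | h2
      · exact Or.inl ((PySem.Set.contains_iff _ _).mp hc)
      · exact Or.inr h2
  | case3 visited current rest hc visitedp ih =>
    intro hinv
    have hcur : current ∉ visited := fun hm => hc ((PySem.Set.contains_iff _ _).mpr hm)
    rw [pvVisit_cons_neg _ _ _ _ hc]
    simp only [visitedp] at ih
    have hinv' : ∀ v ∈ ((PySem.Set.add visited current : PySem.Set Int) : List Int),
        ∀ c ∈ adj.getD v [],
        c ∈ ((PySem.Set.add visited current : PySem.Set Int) : List Int) ∨
          c ∈ rest ++ (adj.getD current []).filter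
            (fun nb => !((PySem.Set.add visited current).contains nb)) := by
      intro v hv c hcadj
      rcases (PySem.Set.mem_add _ _ _).mp hv with hv1 | hv1
      · rcases hinv v hv1 c hcadj with h1 | h1
        · exact Or.inl ((PySem.Set.mem_add _ _ _).mpr (Or.inl h1))
        · rcases List.mem_cons.mp h1 with rfl | h2
          · exact Or.inl ((PySem.Set.mem_add _ _ _).mpr (Or.inr rfl))
          · exact Or.inr (List.mem_append_left _ h2)
      · subst hv1
        by_cases hcc : (PySem.Set.add visited v).contains c = true
        · exact Or.inl ((PySem.Set.contains_iff _ _).mp hcc)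
        · have hfc : (PySem.Set.add visited v).contains c = false := eq_false_of_ne_true hcc
          refine Or.inr (List.mem_append_right _ (List.mem_filter.mpr ⟨hcadj, ?_⟩))
          show (!(PySem.Set.add visited v).contains c) = true
          rw [hfc]
          rfl
    have ih' := ih hinv'
    intro v hv c hcadj
    have hv' : v ∈ ((PySem.Set.add visited current : PySem.Set Int) : List Int)
        ++ pvVisit adj (PySem.Set.add visited current)
          (rest ++ (adj.getD current []).filter
            (fun nb => !((PySem.Set.add visited current).contains nb))) := by
      rcases List.mem_append.mp hv with h1 | h1
      · exact List.mem_append_left _ ((PySem.Set.mem_add _ _ _).mpr (Or.inl h1))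
      · rcases List.mem_cons.mp h1 with rfl | h2
        · exact List.mem_append_left _ ((PySem.Set.mem_add _ _ _).mpr (Or.inr rfl))
        · exact List.mem_append_right _ h2
    have hres := ih' v hv' c hcadj
    rcases List.mem_append.mp hres with h1 | h1
    · rcases (PySem.Set.mem_add _ _ _).mp h1 with h2 | h2
      · exact List.mem_append_left _ h2
      · exact List.mem_append_right _ (h2 ▸ List.mem_cons_self)
    · exact List.mem_append_right _ (List.mem_cons_of_mem _ h1)

lemma pvVisitFull_mem (adj : PySem.Dict Int (List Int)) (node x : Int) :
    x ∈ pvVisit adj [] [node] ↔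
      Relation.ReflTransGen (fun a b => b ∈ adj.getD a []) node x := by
  constructor
  · intro hx
    obtain ⟨q, hq, hr⟩ := pvVisit_sound adj [] [node] x hx
    have : q = node := by simpa using hq
    exact this ▸ hr
  · intro hr
    induction hr with
    | refl =>
      have := pvVisit_mem_queue adj [] [node] node (by simp)
      simpa using this
    | tail hab hbc ih =>
      have := pvVisit_closed adj [] [node] (by intro v hv; simp at hv) _
        (show _ ∈ ([] : List Int) ++ pvVisit adj [] [node] by simpa using ih) _ hbc
      simpa using this

lemma pvClosure_mono (edges : List (Int × Int)) :
    ∀ (fuel : Nat) (reach : PySem.Set Int), ∀ x ∈ (reach : List Int),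
      x ∈ (pvClosure edges fuel reach : List Int) := by
  intro fuel
  induction fuel with
  | zero =>
    intro reach x hx
    simpa [pvClosure] using hx
  | succ fuel ih =>
    intro reach x hx
    rw [pvClosure]
    split
    · exact hx
    · exact ih _ x ((PySem.Set.mem_union _ _ _).mpr (Or.inl hx))

lemma pvClosure_nodup (edges : List (Int × Int)) :
    ∀ (fuel : Nat) (reach : PySem.Set Int), (reach : List Int).Nodup →
      (pvClosure edges fuel reach : List Int).Nodup := by
  intro fuel
  induction fuel with
  | zero =>
    intro reach h
    simpa [pvClosure] using h
  | succ fuel ih =>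
    intro reach h
    rw [pvClosure]
    split
    · exact h
    · exact ih _ (PySem.Set.nodup_union _ _ h)

lemma pvClosure_sound (edges : List (Int × Int)) (node : Int) :
    ∀ (fuel : Nat) (reach : PySem.Set Int),
      (∀ y ∈ (reach : List Int), pvReaches edges node y) →
      ∀ x ∈ (pvClosure edges fuel reach : List Int), pvReaches edges node x := by
  intro fuel
  induction fuel with
  | zero =>
    intro reach h x hx
    rw [pvClosure] at hx
    exact h x hx
  | succ fuel ih =>
    intro reach h x hx
    rw [pvClosure] at hx
    split at hx
    · exact h x hx
    · refine ih _ ?_ x hx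
      intro y hy
      rcases (PySem.Set.mem_union _ _ _).mp hy with h1 | h1
      · exact h y h1
      · obtain ⟨z, hz, hyz⟩ := List.mem_flatMap.mp ((PySem.Set.mem_ofList _ _).mp h1)
        exact Relation.ReflTransGen.tail (h z hz) ((pvChildren_mem _ _ _).mp hyz)

lemma pvSubset_full (U reach : List Int) (hnd : reach.Nodup) (hsub : ∀ x ∈ reach, x ∈ U)
    (hcard : U.dedup.length ≤ reach.length) : ∀ y ∈ U, y ∈ reach := by
  intro y hy
  have h1 : reach.toFinset ⊆ U.toFinset :=
    fun a ha => List.mem_toFinset.mpr (hsub a (List.mem_toFinset.mp ha))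
  have hcr : reach.toFinset.card = reach.length := List.toFinset_card_of_nodup hnd
  have hcu : U.toFinset.card = U.dedup.length := List.card_toFinset U
  have heq : reach.toFinset = U.toFinset :=
    Finset.eq_of_subset_of_card_le h1 (by omega)
  exact List.mem_toFinset.mp (heq ▸ List.mem_toFinset.mpr hy)

lemma pvClosure_closed (edges : List (Int × Int)) (U : List Int)
    (hU : ∀ a c, c ∈ pvChildren edges a → c ∈ U) :
    ∀ (fuel : Nat) (reach : PySem.Set Int), (reach : List Int).Nodup →
      (∀ x ∈ (reach : List Int), x ∈ U) →
      U.dedup.length ≤ reach.length + fuel →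
      ∀ x ∈ (pvClosure edges fuel reach : List Int), ∀ c ∈ pvChildren edges x,
        c ∈ (pvClosure edges fuel reach : List Int) := by
  intro fuel
  induction fuel with
  | zero =>
    intro reach hnd hsub hcard x hx c hc
    rw [pvClosure] at hx ⊢
    exact pvSubset_full U reach hnd hsub (by simpa using hcard) c (hU x c hc)
  | succ fuel ih =>
    intro reach hnd hsub hcard x hx c hc
    have hgnd : (pvGrow edges reach : List Int).Nodup := PySem.Set.nodup_union _ _ hnd
    have hgsub : reach.toFinset ⊆ (pvGrow edges reach : List Int).toFinset := by
      intro a ha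
      exact List.mem_toFinset.mpr
        ((PySem.Set.mem_union _ _ _).mpr (Or.inl (List.mem_toFinset.mp ha)))
    have hlen : reach.length ≤ (pvGrow edges reach : List Int).length := by
      have := Finset.card_le_card hgsub
      rwa [List.toFinset_card_of_nodup hnd, List.toFinset_card_of_nodup hgnd] at this
    rw [pvClosure] at hx ⊢
    by_cases hb : (pvGrow edges reach : List Int).length = reach.length
    · rw [if_pos hb] at hx ⊢
      have hcg : c ∈ (pvGrow edges reach : List Int) :=
        (PySem.Set.mem_union _ _ _).mpr
          (Or.inr ((PySem.Set.mem_ofList _ _).mpr (List.mem_flatMap.mpr ⟨x, hx, hc⟩)))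
      have heq : reach.toFinset = (pvGrow edges reach : List Int).toFinset :=
        Finset.eq_of_subset_of_card_le hgsub
          (by rw [List.toFinset_card_of_nodup hnd, List.toFinset_card_of_nodup hgnd]; omega)
      exact List.mem_toFinset.mp (heq ▸ List.mem_toFinset.mpr hcg)
    · rw [if_neg hb] at hx ⊢
      refine ih (pvGrow edges reach) hgnd ?_ (by omega) x hx c hc
      intro y hy
      rcases (PySem.Set.mem_union _ _ _).mp hy with h1 | h1
      · exact hsub y h1
      · obtain ⟨z, hz, hyz⟩ := List.mem_flatMap.mp ((PySem.Set.mem_ofList _ _).mp h1)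
        exact hU z y hyz

lemma pvClosureFull_mem (edges : List (Int × Int)) (node x : Int) :
    x ∈ (pvClosure edges edges.length [node] : List Int) ↔ pvReaches edges node x := by
  constructor
  · refine pvClosure_sound edges node edges.length [node] ?_ x
    intro y hy
    have : y = node := by simpa using hy
    exact this ▸ Relation.ReflTransGen.refl
  · intro hr
    induction hr with
    | refl => exact pvClosure_mono edges edges.length [node] node (by simp)
    | tail hab hbc ih =>
      refine pvClosure_closed edges (node :: edges.map (fun e => e.2)) ?_ edges.length [node]
        (by simp) ?_ ?_ _ ih _ ((pvChildren_mem _ _ _).mpr hbc)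
      · intro a c hc
        rcases List.mem_map.mp (show c ∈ (edges.filter (fun e => e.1 == a)).map (fun e => e.2)
          from hc) with ⟨e, he, hec⟩
        exact List.mem_cons_of_mem _ (List.mem_map.mpr ⟨e, List.mem_of_mem_filter he, hec⟩)
      · intro xx hxx
        have : xx = node := by simpa using hxx
        exact this ▸ List.mem_cons_self
      · have hd := (List.dedup_sublist (node :: edges.map (fun e => e.2))).length_le
        simp only [List.length_cons, List.length_map] at hd
        rw [show ([node] : PySem.Set Int).length = 1 from rfl]
        omega

-- ---- the two indirect lists are permutations of each other ----

def pvLA (edges : List (Int × Int)) (u : Int) : List Int :=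
  (pvVisit (pvAdjFwd edges) [] [u]).filter (pvIndirect (pvAdjFwd edges) u)

def pvLB (edges : List (Int × Int)) (u : Int) : List Int :=
  PySem.Set.diff (PySem.Set.diff (pvClosure edges edges.length [u])
    (PySem.Set.ofList (pvChildren edges u))) [u]

lemma pvCnt_full (adj : PySem.Dict Int (List Int)) (node : Int) :
    pvCnt adj node [] [(node, 0)]
      = (pvVisit adj [] [node]).filter (pvIndirect adj node) := by
  have hnc : ¬ (PySem.Set.contains ([] : PySem.Set Int) node = true) := by
    simp [PySem.Set.contains_eq_listContains]
  have hadd : PySem.Set.add ([] : PySem.Set Int) node = [node] := by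
    rw [PySem.Set.add_of_not_mem (by simp)]
    simp
  rw [pvCnt_cons_neg _ _ _ _ _ _ hnc]
  rw [if_neg (by norm_num), hadd]
  simp only [List.nil_append]
  have h01 : (0 : Int) + 1 = 1 := by norm_num
  rw [h01]
  rw [pvCnt_eq_filter adj node [node]
      ((((adj.getD node []).filter (fun nb => !(PySem.Set.contains ([node] : PySem.Set Int) nb))).map
        (fun nb => (nb, (1 : Int)))))
      (by simp)
      (by rw [List.pairwise_map]
          exact pvPairwise_const _ _ (fun a b => ⟨le_refl _, by omega⟩))
      (by intro pr hpr
          rcases List.mem_map.mp hpr with ⟨nb, _, hnb⟩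
          rw [← hnb]; simp)
      (by intro pr hpr he
          rcases List.mem_map.mp hpr with ⟨nb, _, hnb⟩
          rw [← hnb] at he ⊢
          simp at he)
      (by intro pr hpr _
          rcases List.mem_map.mp hpr with ⟨nb, hnb', hnb⟩
          rw [← hnb]
          exact List.mem_of_mem_filter hnb')
      (by intro w hw
          by_cases hwn : w = node
          · exact Or.inl (by simp [hwn])
          · refine Or.inr (List.mem_map.mpr ⟨w, List.mem_filter.mpr ⟨hw, ?_⟩, rfl⟩)
            simp [PySem.Set.contains_eq_listContains, hwn])]
  have hmapfst : (((adj.getD node []).filter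
        (fun nb => !(PySem.Set.contains ([node] : PySem.Set Int) nb))).map
        (fun nb => (nb, (1 : Int)))).map Prod.fst
      = (adj.getD node []).filter (fun nb => !(PySem.Set.contains ([node] : PySem.Set Int) nb)) := by
    simp [List.map_map, Function.comp_def]
  rw [hmapfst]
  rw [pvVisit_cons_neg _ _ _ _ hnc, hadd]
  simp only [List.nil_append]
  rw [List.filter_cons]
  have hnode : pvIndirect adj node node = false := by simp [pvIndirect]
  rw [hnode]
  simp

lemma pvLA_perm_pvLB (edges : List (Int × Int)) (u : Int) :
    (pvLA edges u).Perm (pvLB edges u) := by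
  have hnA : (pvLA edges u).Nodup := by
    apply List.Nodup.filter
    have := pvVisit_nodup (pvAdjFwd edges) [] [u] (by simp)
    simpa using this
  have hnB : (pvLB edges u).Nodup := by
    unfold pvLB
    exact PySem.Set.nodup_diff _ _ (PySem.Set.nodup_diff _ _
      (pvClosure_nodup edges edges.length [u] (by simp)))
  rw [List.perm_ext_iff_of_nodup hnA hnB]
  intro a
  unfold pvLA pvLB
  rw [List.mem_filter, PySem.Set.mem_diff, PySem.Set.mem_diff, PySem.Set.mem_ofList,
    pvVisitFull_mem, pvClosureFull_mem]
  rw [pvStep_eq edges]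
  have hind : pvIndirect (pvAdjFwd edges) u a = true ↔ a ∉ pvChildren edges u ∧ a ≠ u := by
    rw [pvIndirect, pvAdjFwd_getD]
    simp [PySem.Set.contains_eq_listContains, List.contains_iff_mem, PySem.Set.mem_ofList]
  rw [hind]
  show pvReaches edges u a ∧ _ ↔ _
  constructor
  · rintro ⟨h1, h2, h3⟩
    exact ⟨⟨h1, h2⟩, by simpa using h3⟩
  · rintro ⟨⟨h1, h2⟩, h3⟩
    exact ⟨h1, h2, by simpa using h3⟩

-- ---- the two sibling computations agree ----

def pvSibA (edges : List (Int × Int)) (u : Int) : Int :=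
  ((PySem.Set.discard (((pvAdjRev edges).getD u []).foldl
    (fun s p => PySem.Set.update s ((pvAdjFwd edges).getD p [])) ([] : PySem.Set Int)) u).length : Int)

def pvSibB (edges : List (Int × Int)) (u : Int) : Int :=
  ((PySem.Set.diff (PySem.Set.ofList
    ((edges.filter (fun e => e.2 == u)).flatMap (fun e => pvChildren edges e.1))) [u]).length : Int)

lemma pvSibA_eq_pvSibB (edges : List (Int × Int)) (u : Int) :
    pvSibA edges u = pvSibB edges u := by
  unfold pvSibA pvSibB
  congr 1
  have hfold : ∀ (ps : List Int) (s : PySem.Set Int),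
      ps.foldl (fun s p => PySem.Set.update s ((pvAdjFwd edges).getD p [])) s
        = PySem.Set.update s (ps.flatMap (fun p => (pvAdjFwd edges).getD p [])) := by
    intro ps
    induction ps with
    | nil => intro s; simp [PySem.Set.update]
    | cons p ps ih =>
      intro s
      simp only [List.foldl_cons, List.flatMap_cons, PySem.Set.update_append]
      exact ih _
  rw [pvAdjRev_getD, hfold, PySem.Set.update_nil_left]
  have hlist : ((edges.filter (fun e => e.2 == u)).map (fun e => e.1)).flatMap
        (fun p => (pvAdjFwd edges).getD p [])
      = (edges.filter (fun e => e.2 == u)).flatMap (fun e => pvChildren edges e.1) := by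
    rw [List.flatMap_map]
    simp [pvAdjFwd_getD]
  rw [hlist]
  congr 1
  unfold PySem.Set.discard PySem.Set.diff
  apply List.filter_congr
  intro x _
  by_cases h : x = u <;> simp [h]

-- ---- column machinery: a row-major table fold projected to one column ----

def pvColOf (T : List (List Int)) (j : Nat) : List Int := T.map (fun row => row.getD j 0)

def pvRect5 (T : List (List Int)) : Prop := ∀ row ∈ T, row.length = 5

lemma pvRect5_pvBump (T : List (List Int)) (a : Int) (j : Nat) (d : Int) (h : pvRect5 T) :
    pvRect5 (pvBump T a j d) := by
  intro row hrow
  unfold pvBump at hrow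
  rcases List.mem_iff_getElem.mp hrow with ⟨i, hi, hrow'⟩
  rw [List.getElem_modify] at hrow'
  split at hrow'
  · rw [← hrow']
    simp [h _ (List.getElem_mem _)]
  · rw [← hrow']
    exact h _ (List.getElem_mem _)

lemma pvRect5_pvSetCol (T : List (List Int)) (a : Int) (j : Nat) (v : Int) (h : pvRect5 T) :
    pvRect5 (pvSetCol T a j v) := by
  intro row hrow
  unfold pvSetCol at hrow
  rcases List.mem_iff_getElem.mp hrow with ⟨i, hi, hrow'⟩
  rw [List.getElem_modify] at hrow'
  split at hrow'
  · rw [← hrow']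
    simp [h _ (List.getElem_mem _)]
  · rw [← hrow']
    exact h _ (List.getElem_mem _)

lemma pvRowGetD_modify_self (row : List Int) (j : Nat) (d : Int) (hj : j < row.length) :
    (row.modify j (· + d)).getD j 0 = row.getD j 0 + d := by
  rw [List.getD_eq_getElem _ _ (by simpa using hj), List.getD_eq_getElem _ _ hj,
    List.getElem_modify]
  simp

lemma pvRowGetD_modify_ne (row : List Int) (j j' : Nat) (f : Int → Int) (h : j' ≠ j) :
    (row.modify j' f).getD j 0 = row.getD j 0 := by
  by_cases hj : j < row.length
  · rw [List.getD_eq_getElem _ _ (by simpa using hj), List.getD_eq_getElem _ _ hj,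
      List.getElem_modify]
    simp [h]
  · rw [List.getD_eq_default _ _ (by simpa using Nat.le_of_not_lt hj),
      List.getD_eq_default _ _ (Nat.le_of_not_lt hj)]

lemma pvRowGetD_set_self (row : List Int) (j : Nat) (v : Int) (hj : j < row.length) :
    (row.set j v).getD j 0 = v := by
  rw [List.getD_eq_getElem _ _ (by simpa using hj), List.getElem_set]
  simp

lemma pvRowGetD_set_ne (row : List Int) (j j' : Nat) (v : Int) (h : j' ≠ j) :
    (row.set j' v).getD j 0 = row.getD j 0 := by
  by_cases hj : j < row.length
  · rw [List.getD_eq_getElem _ _ (by simpa using hj), List.getD_eq_getElem _ _ hj,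
      List.getElem_set]
    simp [h]
  · rw [List.getD_eq_default _ _ (by simpa using Nat.le_of_not_lt hj),
      List.getD_eq_default _ _ (Nat.le_of_not_lt hj)]

lemma pvColOf_pvBump_self (T : List (List Int)) (a : Int) (j : Nat) (d : Int)
    (hR : pvRect5 T) (hj : j < 5) :
    pvColOf (pvBump T a j d) j = pvIncr (pvColOf T j) a d := by
  unfold pvColOf pvBump pvIncr
  simp only [List.length_map]
  apply List.ext_getElem (by simp)
  intro i h1 h2
  simp only [List.getElem_map, List.getElem_modify, List.length_modify, List.length_map] at *
  split_ifs with hcase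
  · rw [pvRowGetD_modify_self]
    rw [hR _ (List.getElem_mem _)]
    exact hj
  · rfl

lemma pvColOf_pvBump_ne (T : List (List Int)) (a : Int) (j j' : Nat) (d : Int) (h : j ≠ j') :
    pvColOf (pvBump T a j' d) j = pvColOf T j := by
  unfold pvColOf pvBump
  apply List.ext_getElem (by simp)
  intro i h1 h2
  simp only [List.getElem_map, List.getElem_modify, List.length_modify, List.length_map] at *
  split_ifs with hcase
  · exact pvRowGetD_modify_ne _ _ _ _ (fun he => h he.symm)
  · rfl

lemma pvColOf_pvSetCol_self (T : List (List Int)) (a : Int) (j : Nat) (v : Int)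
    (hR : pvRect5 T) (hj : j < 5) :
    pvColOf (pvSetCol T a j v) j = pvSet (pvColOf T j) a v := by
  unfold pvColOf pvSetCol pvSet
  simp only [List.length_map]
  apply List.ext_getElem (by simp)
  intro i h1 h2
  simp only [List.getElem_map, List.getElem_modify, List.getElem_set, List.length_modify,
    List.length_set, List.length_map] at *
  split_ifs with hcase
  · rw [pvRowGetD_set_self]
    rw [hR _ (List.getElem_mem _)]
    exact hj
  · rfl

lemma pvColOf_pvSetCol_ne (T : List (List Int)) (a : Int) (j j' : Nat) (v : Int) (h : j ≠ j') :
    pvColOf (pvSetCol T a j' v) j = pvColOf T j := by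
  unfold pvColOf pvSetCol
  apply List.ext_getElem (by simp)
  intro i h1 h2
  simp only [List.getElem_map, List.getElem_modify, List.length_modify, List.length_map] at *
  split_ifs with hcase
  · exact pvRowGetD_set_ne _ _ _ _ (fun he => h he.symm)
  · rfl

lemma pvZip5_cols (T : List (List Int)) (hR : pvRect5 T) :
    pvZip5 (pvColOf T 0) (pvColOf T 1) (pvColOf T 2) (pvColOf T 3) (pvColOf T 4) = T := by
  induction T with
  | nil => rfl
  | cons row T ih =>
    have h5 : row.length = 5 := hR row List.mem_cons_self
    rcases row with _ | ⟨a, _ | ⟨b, _ | ⟨c, _ | ⟨d, _ | ⟨e, rest⟩⟩⟩⟩⟩ <;> simp_all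
    rcases rest with _ | ⟨f, rest⟩
    · have ihT := ih (fun r hr => hR r (List.mem_cons_of_mem _ hr))
      simp only [pvColOf, List.map_cons] at ihT ⊢
      rw [pvZip5, ihT]
      simp [List.getD]
    · simp at h5

lemma pvFoldl_prod_split {α β γ : Type} (l : List γ) (f : α → γ → α) (g : β → γ → β)
    (a : α) (b : β) :
    l.foldl (fun st x => (f st.1 x, g st.2 x)) (a, b) = (l.foldl f a, l.foldl g b) := by
  induction l generalizing a b with
  | nil => rfl
  | cons x xs ih => simpa using ih (f a x) (g b x)


-- ---- folds of row-major updates, projected column by column ----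

lemma pvRect5_foldl {γ : Type} (f : List (List Int) → γ → List (List Int))
    (hf : ∀ T x, pvRect5 T → pvRect5 (f T x)) :
    ∀ (l : List γ) (T : List (List Int)), pvRect5 T → pvRect5 (l.foldl f T) := by
  intro l
  induction l with
  | nil => intro T h; exact h
  | cons x xs ih => intro T h; exact ih _ (hf T x h)

lemma pvColPass1_0 (edges : List (Int × Int)) :
    ∀ (T : List (List Int)), pvRect5 T →
      pvColOf (edges.foldl (fun r e => pvBump (pvBump r (e.1 - 1) 0 1) (e.2 - 1) 1 1) T) 0
        = edges.foldl (fun v e => pvIncr v (e.1 - 1) 1) (pvColOf T 0) := by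
  induction edges with
  | nil => intro T _; rfl
  | cons e es ih =>
    intro T hR
    simp only [List.foldl_cons]
    rw [ih _ (pvRect5_pvBump _ _ _ _ (pvRect5_pvBump _ _ _ _ hR))]
    rw [pvColOf_pvBump_ne _ _ 0 1 _ (by decide), pvColOf_pvBump_self _ _ 0 _ hR (by decide)]

lemma pvColPass1_1 (edges : List (Int × Int)) :
    ∀ (T : List (List Int)), pvRect5 T →
      pvColOf (edges.foldl (fun r e => pvBump (pvBump r (e.1 - 1) 0 1) (e.2 - 1) 1 1) T) 1
        = edges.foldl (fun v e => pvIncr v (e.2 - 1) 1) (pvColOf T 1) := by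
  induction edges with
  | nil => intro T _; rfl
  | cons e es ih =>
    intro T hR
    simp only [List.foldl_cons]
    rw [ih _ (pvRect5_pvBump _ _ _ _ (pvRect5_pvBump _ _ _ _ hR))]
    rw [pvColOf_pvBump_self _ _ 1 _ (pvRect5_pvBump _ _ _ _ hR) (by decide),
      pvColOf_pvBump_ne _ _ 1 0 _ (by decide)]

lemma pvColPass1_other (edges : List (Int × Int)) (j : Nat) (h0 : j ≠ 0) (h1 : j ≠ 1) :
    ∀ (T : List (List Int)),
      pvColOf (edges.foldl (fun r e => pvBump (pvBump r (e.1 - 1) 0 1) (e.2 - 1) 1 1) T) j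
        = pvColOf T j := by
  induction edges with
  | nil => intro T; rfl
  | cons e es ih =>
    intro T
    simp only [List.foldl_cons]
    rw [ih _]
    rw [pvColOf_pvBump_ne _ _ j 1 _ h1, pvColOf_pvBump_ne _ _ j 0 _ h0]

lemma pvColBump3_ne (L : List Int) (j : Nat) (hj : j ≠ 3) :
    ∀ (T : List (List Int)),
      pvColOf (L.foldl (fun r v => pvBump r (v - 1) 3 1) T) j = pvColOf T j := by
  induction L with
  | nil => intro T; rfl
  | cons w ws ih =>
    intro T
    simp only [List.foldl_cons]
    rw [ih _, pvColOf_pvBump_ne _ _ j 3 _ hj]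

lemma pvColBump3_self (L : List Int) :
    ∀ (T : List (List Int)), pvRect5 T →
      pvColOf (L.foldl (fun r v => pvBump r (v - 1) 3 1) T) 3
        = L.foldl (fun v w => pvIncr v (w - 1) 1) (pvColOf T 3) := by
  induction L with
  | nil => intro T _; rfl
  | cons w ws ih =>
    intro T hR
    simp only [List.foldl_cons]
    rw [ih _ (pvRect5_pvBump _ _ _ _ hR), pvColOf_pvBump_self _ _ 3 _ hR (by decide)]

lemma pvColPass2_2 (L : Int → List Int) (amt : Int → Int) (ns : List Int) :
    ∀ (T : List (List Int)), pvRect5 T →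
      pvColOf (ns.foldl (fun r u => (L u).foldl (fun r v => pvBump r (v - 1) 3 1)
          (pvBump r (u - 1) 2 (amt u))) T) 2
        = ns.foldl (fun v u => pvIncr v (u - 1) (amt u)) (pvColOf T 2) := by
  induction ns with
  | nil => intro T _; rfl
  | cons u us ih =>
    intro T hR
    simp only [List.foldl_cons]
    rw [ih _ (pvRect5_foldl _ (fun T v h => pvRect5_pvBump _ _ _ _ h) _ _
      (pvRect5_pvBump _ _ _ _ hR))]
    rw [pvColBump3_ne _ 2 (by decide), pvColOf_pvBump_self _ _ 2 _ hR (by decide)]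

lemma pvColPass2_3 (L : Int → List Int) (amt : Int → Int) (ns : List Int) :
    ∀ (T : List (List Int)), pvRect5 T →
      pvColOf (ns.foldl (fun r u => (L u).foldl (fun r v => pvBump r (v - 1) 3 1)
          (pvBump r (u - 1) 2 (amt u))) T) 3
        = ns.foldl (fun v u => (L u).foldl (fun v w => pvIncr v (w - 1) 1) v) (pvColOf T 3) := by
  induction ns with
  | nil => intro T _; rfl
  | cons u us ih =>
    intro T hR
    simp only [List.foldl_cons]
    rw [ih _ (pvRect5_foldl _ (fun T v h => pvRect5_pvBump _ _ _ _ h) _ _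
      (pvRect5_pvBump _ _ _ _ hR))]
    rw [pvColBump3_self _ _ (pvRect5_pvBump _ _ _ _ hR), pvColOf_pvBump_ne _ _ 3 2 _ (by decide)]

lemma pvColPass2_other (L : Int → List Int) (amt : Int → Int) (ns : List Int) (j : Nat)
    (h2 : j ≠ 2) (h3 : j ≠ 3) :
    ∀ (T : List (List Int)),
      pvColOf (ns.foldl (fun r u => (L u).foldl (fun r v => pvBump r (v - 1) 3 1)
          (pvBump r (u - 1) 2 (amt u))) T) j
        = pvColOf T j := by
  induction ns with
  | nil => intro T; rfl
  | cons u us ih =>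
    intro T
    simp only [List.foldl_cons]
    rw [ih _, pvColBump3_ne _ j h3, pvColOf_pvBump_ne _ _ j 2 _ h2]

lemma pvColPass3_4 (sib : Int → Int) (ns : List Int) :
    ∀ (T : List (List Int)), pvRect5 T →
      pvColOf (ns.foldl (fun r u => pvSetCol r (u - 1) 4 (sib u)) T) 4
        = ns.foldl (fun v u => pvSet v (u - 1) (sib u)) (pvColOf T 4) := by
  induction ns with
  | nil => intro T _; rfl
  | cons u us ih =>
    intro T hR
    simp only [List.foldl_cons]
    rw [ih _ (pvRect5_pvSetCol _ _ _ _ hR), pvColOf_pvSetCol_self _ _ 4 _ hR (by decide)]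

lemma pvColPass3_other (sib : Int → Int) (ns : List Int) (j : Nat) (h4 : j ≠ 4) :
    ∀ (T : List (List Int)),
      pvColOf (ns.foldl (fun r u => pvSetCol r (u - 1) 4 (sib u)) T) j = pvColOf T j := by
  induction ns with
  | nil => intro T; rfl
  | cons u us ih =>
    intro T
    simp only [List.foldl_cons]
    rw [ih _, pvColOf_pvSetCol_ne _ _ j 4 _ h4]

-- ===== VERDICT (by name: the statement is the Claim_ definition above) =====
theorem compute_relationships_spec : Claim_equal_compute_relationships := by
  intro edges total_nodes _ _
  show compute_relationships edges total_nodes = compute_relationships_alt edges total_nodes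
  unfold compute_relationships compute_relationships_alt
  dsimp only
  have hsplit1 : edges.foldl
      (fun st e => (pvIncr st.1 (e.1 - 1) 1, pvIncr st.2 (e.2 - 1) 1))
      (List.replicate total_nodes.toNat 0, List.replicate total_nodes.toNat 0)
      = (edges.foldl (fun v e => pvIncr v (e.1 - 1) 1) (List.replicate total_nodes.toNat 0),
         edges.foldl (fun v e => pvIncr v (e.2 - 1) 1) (List.replicate total_nodes.toNat 0)) :=
    pvFoldl_prod_split edges (fun a e => pvIncr a (e.1 - 1) 1)
      (fun b e => pvIncr b (e.2 - 1) 1) _ _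
  have hsplit2 : (PySem.List.pyRange 1 (total_nodes + 1) 1).foldl
      (fun st u =>
        (pvIncr st.1 (u - 1)
          ((PySem.Set.diff (PySem.Set.diff (pvClosure edges edges.length [u])
            (PySem.Set.ofList (pvChildren edges u))) [u]).length : Int),
         (PySem.Set.diff (PySem.Set.diff (pvClosure edges edges.length [u])
            (PySem.Set.ofList (pvChildren edges u))) [u]).foldl
           (fun v w => pvIncr v (w - 1) 1) st.2))
      (List.replicate total_nodes.toNat 0, List.replicate total_nodes.toNat 0)
      = ((PySem.List.pyRange 1 (total_nodes + 1) 1).foldl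
          (fun v u => pvIncr v (u - 1) ((pvLB edges u).length : Int))
          (List.replicate total_nodes.toNat 0),
         (PySem.List.pyRange 1 (total_nodes + 1) 1).foldl
          (fun v u => (pvLB edges u).foldl (fun v w => pvIncr v (w - 1) 1) v)
          (List.replicate total_nodes.toNat 0)) :=
    pvFoldl_prod_split _ (fun a u => pvIncr a (u - 1) ((pvLB edges u).length : Int))
      (fun b u => (pvLB edges u).foldl (fun v w => pvIncr v (w - 1) 1) b) _ _
  rw [hsplit1, hsplit2]
  dsimp only
  -- A side: grouped degree pass = one sweep over the edges
  have hdeg : (pvAdjFwd edges).items.foldl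
      (fun r pc => pc.2.foldl (fun r c => pvBump (pvBump r (pc.1 - 1) 0 1) (c - 1) 1 1) r)
      (List.replicate total_nodes.toNat (List.replicate 5 0))
      = edges.foldl (fun r e => pvBump (pvBump r (e.1 - 1) 0 1) (e.2 - 1) 1 1)
        (List.replicate total_nodes.toNat (List.replicate 5 0)) := by
    rw [pvDeg_A_eq]
    haveI : RightCommutative (fun (r : List (List Int)) (e : Int × Int) =>
        pvBump (pvBump r (e.1 - 1) 0 1) (e.2 - 1) 1 1) := ⟨pvDeg_rcomm⟩
    apply List.Perm.foldl_eq
    have hp := pvPairs_build edges (PySem.Dict.mk []) (by simp [PySem.Dict.keys])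
    simpa [pvPairs] using hp
  rw [hdeg]
  -- A side: each per-node BFS = bulk col-2 bump + col-3 fold over pvLA
  have hfun : (fun (r : List (List Int)) (node : Int) =>
        pvBfsA (pvAdjFwd edges) node [] [(node, 0)] r)
      = (fun (r : List (List Int)) (u : Int) =>
          (pvLA edges u).foldl (fun r v => pvBump r (v - 1) 3 1)
            (pvBump r (u - 1) 2 ((pvLA edges u).length : Int))) := by
    funext r u
    rw [pvBfsA_eq_foldl, pvCnt_full, pvApply_interchange]
    rfl
  rw [hfun]
  -- A side: name the sibling value
  have hsib : (fun (r : List (List Int)) (node : Int) =>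
        pvSetCol r (node - 1) 4
          ((PySem.Set.discard (((pvAdjRev edges).getD node []).foldl
            (fun s p => PySem.Set.update s ((pvAdjFwd edges).getD p []))
            ([] : PySem.Set Int)) node).length : Int))
      = (fun (r : List (List Int)) (u : Int) => pvSetCol r (u - 1) 4 (pvSibA edges u)) := rfl
  rw [hsib]
  -- Rectangularity of the A-side tables
  have hR0 : pvRect5 (List.replicate total_nodes.toNat (List.replicate 5 (0 : Int))) := by
    intro row hrow
    rw [List.eq_of_mem_replicate hrow]
    rfl
  have hR1 : pvRect5 (edges.foldl (fun r e => pvBump (pvBump r (e.1 - 1) 0 1) (e.2 - 1) 1 1)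
      (List.replicate total_nodes.toNat (List.replicate 5 0))) :=
    pvRect5_foldl _ (fun T e h => pvRect5_pvBump _ _ _ _ (pvRect5_pvBump _ _ _ _ h)) _ _ hR0
  have hR2 : pvRect5 ((PySem.List.pyRange 1 (total_nodes + 1) 1).foldl
      (fun r u => (pvLA edges u).foldl (fun r v => pvBump r (v - 1) 3 1)
        (pvBump r (u - 1) 2 ((pvLA edges u).length : Int)))
      (edges.foldl (fun r e => pvBump (pvBump r (e.1 - 1) 0 1) (e.2 - 1) 1 1)
        (List.replicate total_nodes.toNat (List.replicate 5 0)))) :=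
    pvRect5_foldl _ (fun T u h => pvRect5_foldl _ (fun T v h => pvRect5_pvBump _ _ _ _ h) _ _
      (pvRect5_pvBump _ _ _ _ h)) _ _ hR1
  have hR3 : pvRect5 ((PySem.List.pyRange 1 (total_nodes + 1) 1).foldl
      (fun r u => pvSetCol r (u - 1) 4 (pvSibA edges u))
      ((PySem.List.pyRange 1 (total_nodes + 1) 1).foldl
        (fun r u => (pvLA edges u).foldl (fun r v => pvBump r (v - 1) 3 1)
          (pvBump r (u - 1) 2 ((pvLA edges u).length : Int)))
        (edges.foldl (fun r e => pvBump (pvBump r (e.1 - 1) 0 1) (e.2 - 1) 1 1)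
          (List.replicate total_nodes.toNat (List.replicate 5 0))))) :=
    pvRect5_foldl _ (fun T u h => pvRect5_pvSetCol _ _ _ _ h) _ _ hR2
  rw [← pvZip5_cols _ hR3]
  -- columns of the initial table
  have hz : ∀ j : Nat, j < 5 → pvColOf (List.replicate total_nodes.toNat
      (List.replicate 5 (0 : Int))) j = List.replicate total_nodes.toNat (0 : Int) := by
    intro j hj
    unfold pvColOf
    rw [List.map_replicate]
    interval_cases j <;> rfl
  -- column 0
  rw [pvColPass3_other (pvSibA edges) _ 0 (by decide), pvColPass2_other _ _ _ 0 (by decide) (by decide), pvColPass1_0 edges _ hR0,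
    hz 0 (by decide)]
  -- column 1
  rw [pvColPass3_other (pvSibA edges) _ 1 (by decide),
    pvColPass2_other _ _ _ 1 (by decide) (by decide), pvColPass1_1 edges _ hR0,
    hz 1 (by decide)]
  -- column 2
  rw [pvColPass3_other (pvSibA edges) _ 2 (by decide), pvColPass2_2 _ _ _ _ hR1,
    pvColPass1_other edges 2 (by decide) (by decide), hz 2 (by decide)]
  -- column 3
  rw [pvColPass3_other (pvSibA edges) _ 3 (by decide), pvColPass2_3 _ _ _ _ hR1,
    pvColPass1_other edges 3 (by decide) (by decide), hz 3 (by decide)]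
  -- column 4
  rw [pvColPass3_4 (pvSibA edges) _ _ hR2,
    pvColPass2_other _ _ _ 4 (by decide) (by decide),
    pvColPass1_other edges 4 (by decide) (by decide), hz 4 (by decide)]
  -- replace the A-side per-node data by the B-side per-node data
  have hlen : (fun (v : List Int) (u : Int) => pvIncr v (u - 1) ((pvLA edges u).length : Int))
      = (fun (v : List Int) (u : Int) => pvIncr v (u - 1) ((pvLB edges u).length : Int)) := by
    funext v u
    rw [(pvLA_perm_pvLB edges u).length_eq]
  have hfold3 : (fun (v : List Int) (u : Int) =>
        (pvLA edges u).foldl (fun v w => pvIncr v (w - 1) 1) v)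
      = (fun (v : List Int) (u : Int) =>
        (pvLB edges u).foldl (fun v w => pvIncr v (w - 1) 1) v) := by
    funext v u
    haveI : RightCommutative (fun (v : List Int) (w : Int) => pvIncr v (w - 1) 1) :=
      ⟨fun v w w' => pvIncr_comm v (w - 1) (w' - 1) 1 1⟩
    exact (pvLA_perm_pvLB edges u).foldl_eq v
  have hsibf : (fun (v : List Int) (u : Int) => pvSet v (u - 1) (pvSibA edges u))
      = (fun (v : List Int) (u : Int) => pvSet v (u - 1) (pvSibB edges u)) := by
    funext v u
    rw [pvSibA_eq_pvSibB]
  rw [hlen, hfold3, hsibf]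
  rfl
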